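-- pv_equiv track=rewrite | github.com/gaoshang1999/Python | ehealth/test.py | myImplement
-- ===== SOURCE A (Python) =====
-- def myImplement(array):
--     n = len(array)
--     mylist = [0 for _ in range(n)]
--     dictionary = {}
--     for i in range(n):
--         a = array[i]
--         if a in dictionary:
--             if dictionary[a] >= 0: # if element appears twice, mark index of mylist to 1
--                 mylist[dictionary[a]] = 1
--             dictionary[a] = -1
--         else: # record the index where first time an element appear
--             dictionary[a] = i
--
--     return [x[1] for x in zip(mylist,array) if x[0] == 1]
-- ===== SOURCE B (Python) =====
-- def myImplement(array):
--     # two passes: count everything first, then emit first occurrences of duplicates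
--     counts = {}
--     for a in array:
--         counts[a] = counts.get(a, 0) + 1
--     result = []
--     seen = set()
--     for a in array:
--         if counts[a] > 1 and a not in seen:
--             result.append(a)
--             seen.add(a)
--     return result
-- ===== Notes on version B (the rewrite author's own statement) =====
-- stated objective: simpler
-- what changed: Replaces A's single-pass index-marking scheme (a 0/1 mask list plus a dict storing first index or -1 sentinel, then a zip-filter pass) with a plain two-pass decomposition: count all occurrences first, then one ordered pass appending each element with count>1 the first time it is seen.
import Mathlib
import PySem

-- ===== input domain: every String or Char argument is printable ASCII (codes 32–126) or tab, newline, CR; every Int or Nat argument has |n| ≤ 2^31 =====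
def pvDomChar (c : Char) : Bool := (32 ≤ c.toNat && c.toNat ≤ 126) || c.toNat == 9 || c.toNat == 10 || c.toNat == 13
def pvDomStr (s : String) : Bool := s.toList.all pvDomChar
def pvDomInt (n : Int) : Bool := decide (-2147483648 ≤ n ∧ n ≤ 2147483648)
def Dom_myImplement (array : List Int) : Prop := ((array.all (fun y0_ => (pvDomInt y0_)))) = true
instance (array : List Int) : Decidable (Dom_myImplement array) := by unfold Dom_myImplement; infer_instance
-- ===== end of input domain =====

-- B replaces A's single-pass first-index-marking scheme (mask list + dict of first index / -1)
-- by a plain two-pass decomposition: count all occurrences, then emit each count>1 element at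
-- its first occurrence.  Objective: simpler; same O(n) cost.

-- ===== PORT A =====
def myImplement (array : List Int) : List Int :=
  let n := array.length
  let mylist : List Int := (PySem.List.pyRange 0 (n : Int)).map (fun _ => (0 : Int))
  let st := (PySem.List.pyRange 0 (n : Int)).foldl
    (fun (st : List Int × PySem.Dict Int Int) i =>
      -- a = array[i]; i ranges over range(n), so the access is always in range (exact)
      let a := PySem.List.pyGetD array i 0
      if st.2.contains a then
        ((if 0 ≤ st.2.getD a 0 then st.1.set (st.2.getD a 0).toNat 1 else st.1),
         st.2.insert a (-1))
      else
        (st.1, st.2.insert a i))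
    (mylist, PySem.Dict.empty)
  ((st.1.zip array).filter (fun x => x.1 == 1)).map (fun x => x.2)

-- ===== PORT B =====
def myImplement_alt (array : List Int) : List Int :=
  let counts : PySem.Dict Int Int :=
    array.foldl (fun d a => d.insert a (d.getD a 0 + 1)) PySem.Dict.empty
  let st := array.foldl
    (fun (st : List Int × PySem.Set Int) a =>
      if decide (1 < counts.getD a 0) && !(PySem.Set.contains st.2 a) then
        (st.1 ++ [a], PySem.Set.add st.2 a)
      else st)
    (([] : List Int), PySem.Set.empty)
  st.1

-- ===== PRECONDITION & SPEC =====
def Spec_myImplement (array : List Int) (out : List Int) : Prop := out = myImplement_alt array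
instance (array : List Int) (out : List Int) : Decidable (Spec_myImplement array out) := by unfold Spec_myImplement; infer_instance

-- ===== CLAIM (what is proved, stated in full; the proofs are below) =====
def Claim_equal_myImplement : Prop := ∀ (array : List Int), Dom_myImplement array → Spec_myImplement array (myImplement array)

-- ===== LEMMAS AND PROOFS =====

-- The 0/1 mask A's loop has built after processing the first i elements of `full`:
-- position j carries 1 iff j is the first index of its value and that value occurs
-- at least twice among the first i elements.
def dupMask (full : List Int) (i : Nat) : List Int :=
  (List.range full.length).map (fun j =>
    if List.idxOf (full.getD j 0) full = j ∧ 2 ≤ List.count (full.getD j 0) (full.take i) then (1 : Int) else 0)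

-- The lookup table A's loop has built after processing the prefix `pre`.
def dspec (pre : List Int) (a : Int) : Option Int :=
  if List.count a pre = 0 then none
  else if List.count a pre = 1 then some ((List.idxOf a pre : Int))
  else some (-1)

-- B's second loop, as structural recursion over the remaining input.
def canonGo (p : Int → Bool) : List Int → List Int → List Int
  | [], _ => []
  | a :: rest, seen =>
    if p a && !(seen.contains a) then a :: canonGo p rest (seen ++ [a])
    else canonGo p rest seen

lemma b_loop (p : Int → Bool) (l : List Int) : ∀ (res : List Int) (seen : PySem.Set Int),
    (l.foldl
      (fun (st : List Int × PySem.Set Int) a =>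
        if p a && !(PySem.Set.contains st.2 a) then (st.1 ++ [a], PySem.Set.add st.2 a)
        else st)
      (res, seen)).1 = res ++ canonGo p l seen := by
  induction l with
  | nil => intro res seen; simp [canonGo]
  | cons a rest ih =>
    intro res seen
    rw [List.foldl_cons]
    simp only [canonGo]
    have hcs : PySem.Set.contains seen a = List.contains seen a :=
      PySem.Set.contains_eq_listContains _ _
    by_cases h : (p a && !(List.contains seen a)) = true
    · rw [if_pos (show (p a && !(PySem.Set.contains seen a)) = true by rw [hcs]; exact h),
        if_pos h]
      have hnm : a ∉ seen := by
        simp only [Bool.and_eq_true, Bool.not_eq_true'] at h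
        simpa using h.2
      rw [PySem.Set.add_of_not_mem hnm, ih]
      simp
    · rw [if_neg (show ¬ (p a && !(PySem.Set.contains seen a)) = true by rw [hcs]; exact h),
        if_neg h, ih]

lemma canonGo_eq (p : Int → Bool) : ∀ (l seen : List Int),
    canonGo p l seen = (PySem.Set.ofList l).filter (fun a => p a && !(seen.contains a)) := by
  intro l
  induction l with
  | nil => intro seen; simp [canonGo, PySem.Set.ofList]
  | cons a rest ih =>
    intro seen
    rw [PySem.Set.ofList_cons]
    simp only [canonGo, PySem.Set.discard, List.filter_cons, List.filter_filter]
    by_cases h : (p a && !(List.contains seen a)) = true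
    · rw [if_pos h, if_pos h, ih]
      congr 1
      apply List.filter_congr
      intro x _
      by_cases hxa : x = a
      · subst hxa; simp
      · simp [hxa]
    · rw [if_neg h, if_neg h, ih]
      apply List.filter_congr
      intro x _
      by_cases hxa : x = a
      · subst hxa
        have h' : (p x && !(seen.contains x)) = false := by simpa using h
        simp
        intro hp
        rw [hp, Bool.true_and] at h'
        simpa using h'
      · have hx' : (x == a) = false := by simpa using hxa
        simp [hx']

lemma take_concat (l : List Int) (i : Nat) (hi : i < l.length) :
    l.take (i + 1) = l.take i ++ [l.getD i 0] := by
  have h1 : l[i]? = some l[i] := List.getElem?_eq_getElem hi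
  rw [List.take_add_one, h1, List.getD_eq_getElem _ _ hi]
  simp

lemma idxOf_take (l : List Int) (i : Nat) (v : Int) (hv : v ∈ l.take i) :
    List.idxOf v l = List.idxOf v (l.take i) := by
  conv_lhs => rw [← List.take_append_drop i l]
  rw [List.idxOf_append, if_pos hv]

lemma count_take_succ (l : List Int) (i : Nat) (hi : i < l.length) (v : Int) :
    List.count v (l.take (i + 1))
      = List.count v (l.take i) + (if l.getD i 0 = v then 1 else 0) := by
  rw [take_concat l i hi, List.count_append, List.count_singleton]
  simp only [beq_iff_eq]

lemma dupMask_eq_of_iff (full : List Int) (i i' : Nat)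
    (h : ∀ v, 2 ≤ List.count v (full.take i) ↔ 2 ≤ List.count v (full.take i')) :
    dupMask full i = dupMask full i' := by
  unfold dupMask
  apply List.map_congr_left
  intro j _
  rw [if_congr (and_congr Iff.rfl (h _)) rfl rfl]

lemma dupMask_succ_of_fresh (full : List Int) (i : Nat) (hi : i < full.length)
    (h : List.count (full.getD i 0) (full.take i) = 0) :
    dupMask full (i + 1) = dupMask full i := by
  apply Eq.symm
  apply dupMask_eq_of_iff
  intro v
  rw [count_take_succ full i hi v]
  by_cases hv : full.getD i 0 = v
  · subst hv; rw [if_pos rfl]; omega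
  · rw [if_neg hv]; omega

lemma dupMask_succ_of_many (full : List Int) (i : Nat) (hi : i < full.length)
    (h : 2 ≤ List.count (full.getD i 0) (full.take i)) :
    dupMask full (i + 1) = dupMask full i := by
  apply Eq.symm
  apply dupMask_eq_of_iff
  intro v
  rw [count_take_succ full i hi v]
  by_cases hv : full.getD i 0 = v
  · subst hv; rw [if_pos rfl]; omega
  · rw [if_neg hv]; omega

lemma dupMask_succ_of_one (full : List Int) (i : Nat) (hi : i < full.length)
    (h : List.count (full.getD i 0) (full.take i) = 1) :
    dupMask full (i + 1)
      = (dupMask full i).set (List.idxOf (full.getD i 0) (full.take i)) 1 := by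
  have hmem : full.getD i 0 ∈ full.take i := by
    rw [← List.count_pos_iff]; omega
  have hj0lt : List.idxOf (full.getD i 0) (full.take i) < i := by
    have := List.idxOf_lt_length_of_mem hmem
    rwa [List.length_take, Nat.min_eq_left (le_of_lt hi)] at this
  have hidxfull : List.idxOf (full.getD i 0) full = List.idxOf (full.getD i 0) (full.take i) :=
    idxOf_take full i _ hmem
  have hlen : ∀ k, (dupMask full k).length = full.length := by
    intro k; simp [dupMask]
  apply List.ext_getElem
  · simp [hlen, List.length_set]
  · intro j h1 h2
    rw [hlen] at h1
    rw [List.getElem_set]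
    simp only [dupMask, List.getElem_map, List.getElem_range]
    by_cases hje : List.idxOf (full.getD i 0) (full.take i) = j
    · rw [if_pos hje]
      have hjlt : List.idxOf (full.getD i 0) (full.take i) < full.length := lt_trans hj0lt hi
      have hgj : full.getD j 0 = full.getD i 0 := by
        have h2' := List.getElem_idxOf (x := full.getD i 0) (xs := full)
          (by rw [hidxfull]; exact hjlt)
        rw [← hje, List.getD_eq_getElem _ _ hjlt]
        simp only [hidxfull] at h2'
        exact h2'
      rw [if_pos]
      constructor
      · rw [hgj, hidxfull, hje]
      · rw [hgj, count_take_succ full i hi, if_pos rfl, h]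
    · rw [if_neg hje]
      by_cases hv : full.getD j 0 = full.getD i 0
      · have hne : List.idxOf (full.getD j 0) full ≠ j := by
          rw [hv, hidxfull]; exact hje
        rw [if_neg (fun hh => hne hh.1), if_neg (fun hh => hne hh.1)]
      · rw [count_take_succ full i hi,
          if_neg (show ¬ full.getD i 0 = full.getD j 0 from fun hh => hv hh.symm)]
        simp only [Nat.add_zero]

lemma a_loop (full : List Int) : ∀ (m i : Nat) (ml : List Int) (d : PySem.Dict Int Int),
    i + m = full.length →
    ml = dupMask full i →
    (∀ a : Int, d.get? a = dspec (full.take i) a) →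
    ((List.map (fun k : Nat => (k : Int)) (List.range' i m)).foldl
      (fun (st : List Int × PySem.Dict Int Int) i =>
        if st.2.contains (PySem.List.pyGetD full i 0) then
          ((if 0 ≤ st.2.getD (PySem.List.pyGetD full i 0) 0 then
              st.1.set (st.2.getD (PySem.List.pyGetD full i 0) 0).toNat 1
            else st.1),
           st.2.insert (PySem.List.pyGetD full i 0) (-1))
        else
          (st.1, st.2.insert (PySem.List.pyGetD full i 0) i))
      (ml, d)).1 = dupMask full full.length := by
  intro m
  induction m with
  | zero =>
    intro i ml d hlen hml _
    rw [List.range'_zero, List.map_nil, List.foldl_nil, hml]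
    have : i = full.length := by omega
    rw [this]
  | succ m ih =>
    intro i ml d hlen hml hd
    have hi : i < full.length := by omega
    simp only [List.range'_succ, List.map_cons, List.foldl_cons, PySem.List.pyGetD_natCast]
    have hcont : d.contains (full.getD i 0) = (dspec (full.take i) (full.getD i 0)).isSome := by
      rw [PySem.Dict.contains_eq_isSome_get?, hd]
    have hgetD : d.getD (full.getD i 0) 0 = (dspec (full.take i) (full.getD i 0)).getD 0 := by
      show (d.get? _).getD 0 = _
      rw [hd]
    rcases hc : List.count (full.getD i 0) (full.take i) with _ | c
    · -- first occurrence: not in the dict yet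
      have hcontf : d.contains (full.getD i 0) = false := by
        rw [hcont]
        unfold dspec
        rw [if_pos hc]
        rfl
      rw [hcontf, if_neg (by simp)]
      apply ih (i + 1) ml (d.insert (full.getD i 0) (i : Int)) (by omega)
      · rw [hml, dupMask_succ_of_fresh full i hi hc]
      · intro a
        have hnm : full.getD i 0 ∉ full.take i := by rw [← List.count_eq_zero, hc]
        by_cases hax : a = full.getD i 0
        · subst hax
          rw [PySem.Dict.get?_insert_self]
          unfold dspec
          have hcnt : List.count (full.getD i 0) (full.take (i + 1)) = 1 := by
            rw [count_take_succ full i hi, hc, if_pos rfl]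
          rw [hcnt, if_neg (by omega), if_pos rfl]
          rw [take_concat full i hi, List.idxOf_append, if_neg hnm]
          simp [List.idxOf_cons_self, List.length_take, Nat.min_eq_left (le_of_lt hi)]
        · rw [PySem.Dict.get?_insert_of_ne _ _ hax, hd]
          unfold dspec
          rw [count_take_succ full i hi,
            if_neg (show ¬ full.getD i 0 = a from fun hh => hax hh.symm)]
          simp only [Nat.add_zero]
          by_cases h1 : List.count a (full.take i) = 1
          · have hmema : a ∈ full.take i := by rw [← List.count_pos_iff]; omega
            rw [take_concat full i hi, List.idxOf_append, if_pos hmema]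
          · by_cases h0 : List.count a (full.take i) = 0
            · rw [if_pos h0, if_pos h0]
            · rw [if_neg h0, if_neg h0, if_neg h1, if_neg h1]
    · -- the element is already in the dict
      have hcontt : d.contains (full.getD i 0) = true := by
        rw [hcont]
        unfold dspec
        rw [if_neg (show ¬ List.count (full.getD i 0) (full.take i) = 0 by omega)]
        by_cases h1 : List.count (full.getD i 0) (full.take i) = 1
        · rw [if_pos h1]; rfl
        · rw [if_neg h1]; rfl
      rw [hcontt, if_pos rfl]
      rcases c with _ | c
      · -- second occurrence: mark its first index in the mask
        have hone : List.count (full.getD i 0) (full.take i) = 1 := hc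
        have hval : d.getD (full.getD i 0) 0
            = ((List.idxOf (full.getD i 0) (full.take i) : Nat) : Int) := by
          rw [hgetD]
          unfold dspec
          rw [if_neg (show ¬ List.count (full.getD i 0) (full.take i) = 0 by omega),
            if_pos hone]
          rfl
        rw [hval, if_pos (by positivity)]
        simp only [Int.toNat_natCast]
        apply ih (i + 1) _ _ (by omega)
        · rw [hml, dupMask_succ_of_one full i hi hone]
        · intro a
          by_cases hax : a = full.getD i 0
          · subst hax
            rw [PySem.Dict.get?_insert_self]
            unfold dspec
            have hcnt : List.count (full.getD i 0) (full.take (i + 1)) = 2 := by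
              rw [count_take_succ full i hi, hone, if_pos rfl]
            rw [hcnt, if_neg (by omega), if_neg (by omega)]
          · rw [PySem.Dict.get?_insert_of_ne _ _ hax, hd]
            unfold dspec
            rw [count_take_succ full i hi,
            if_neg (show ¬ full.getD i 0 = a from fun hh => hax hh.symm)]
            simp only [Nat.add_zero]
            by_cases h1 : List.count a (full.take i) = 1
            · have hmema : a ∈ full.take i := by rw [← List.count_pos_iff]; omega
              rw [take_concat full i hi, List.idxOf_append, if_pos hmema]
            · by_cases h0 : List.count a (full.take i) = 0
              · rw [if_pos h0, if_pos h0]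
              · rw [if_neg h0, if_neg h0, if_neg h1, if_neg h1]
      · -- third or later occurrence: the dict value is the -1 sentinel
        have hval : d.getD (full.getD i 0) 0 = -1 := by
          rw [hgetD]
          unfold dspec
          rw [if_neg (show ¬ List.count (full.getD i 0) (full.take i) = 0 by omega),
            if_neg (show ¬ List.count (full.getD i 0) (full.take i) = 1 by omega)]
          rfl
        rw [hval, if_neg (by omega)]
        apply ih (i + 1) _ _ (by omega)
        · rw [hml, dupMask_succ_of_many full i hi (by omega)]
        · intro a
          by_cases hax : a = full.getD i 0
          · subst hax
            rw [PySem.Dict.get?_insert_self]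
            unfold dspec
            have hcnt : List.count (full.getD i 0) (full.take (i + 1)) = c + 1 + 1 + 1 := by
              rw [count_take_succ full i hi, hc, if_pos rfl]
            rw [hcnt, if_neg (by omega), if_neg (by omega)]
          · rw [PySem.Dict.get?_insert_of_ne _ _ hax, hd]
            unfold dspec
            rw [count_take_succ full i hi,
            if_neg (show ¬ full.getD i 0 = a from fun hh => hax hh.symm)]
            simp only [Nat.add_zero]
            by_cases h1 : List.count a (full.take i) = 1
            · have hmema : a ∈ full.take i := by rw [← List.count_pos_iff]; omega
              rw [take_concat full i hi, List.idxOf_append, if_pos hmema]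
            · by_cases h0 : List.count a (full.take i) = 0
              · rw [if_pos h0, if_pos h0]
              · rw [if_neg h0, if_neg h0, if_neg h1, if_neg h1]

lemma extract (q : Int → Prop) [DecidablePred q] : ∀ (l : List Int),
    ((((List.range l.length).map (fun j =>
        if List.idxOf (l.getD j 0) l = j ∧ q (l.getD j 0) then (1 : Int) else 0)).zip l).filter
      (fun x => x.1 == 1)).map (fun x => x.2)
    = (PySem.Set.ofList l).filter (fun a => decide (q a)) := by
  intro l
  induction l using List.reverseRecOn with
  | nil => simp [PySem.Set.ofList]
  | append_singleton l a ih =>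
    have hlen : (l ++ [a]).length = l.length + 1 := by simp
    rw [hlen, List.range_succ, List.map_append, List.zip_append (by simp)]
    rw [List.filter_append, List.map_append]
    have hmaps : (List.range l.length).map (fun j =>
        if List.idxOf ((l ++ [a]).getD j 0) (l ++ [a]) = j ∧ q ((l ++ [a]).getD j 0) then (1 : Int) else 0)
        = (List.range l.length).map (fun j =>
        if List.idxOf (l.getD j 0) l = j ∧ q (l.getD j 0) then (1 : Int) else 0) := by
      apply List.map_congr_left
      intro j hj
      rw [List.mem_range] at hj
      rw [List.getD_append _ _ _ _ hj]
      have hmem : l.getD j 0 ∈ l := by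
        rw [List.getD_eq_getElem _ _ hj]; exact List.getElem_mem hj
      rw [List.idxOf_append, if_pos hmem]
    rw [hmaps, ih]
    have hgda : (l ++ [a]).getD l.length 0 = a := by
      rw [List.getD_append_right _ _ _ _ (le_refl _)]
      simp
    rw [PySem.Set.ofList_append_singleton]
    by_cases hmem : a ∈ l
    · have hlt : List.idxOf a l < l.length := List.idxOf_lt_length_of_mem hmem
      have hne : ¬ (List.idxOf a (l ++ [a]) = l.length) := by
        rw [List.idxOf_append, if_pos hmem]
        omega
      rw [PySem.Set.add_of_mem (by simpa [PySem.Set.mem_ofList] using hmem)]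
      simp [hne]
    · have hidx : List.idxOf a (l ++ [a]) = l.length := by
        rw [List.idxOf_append, if_neg hmem, List.idxOf_cons_self]
        omega
      rw [PySem.Set.add_of_not_mem (by simpa [PySem.Set.mem_ofList] using hmem)]
      rw [List.filter_append]
      by_cases hq : q a
      · simp [hidx, hq]
      · simp [hidx, hq]

lemma alt_eq_filter (array : List Int) :
    myImplement_alt array
      = (PySem.Set.ofList array).filter (fun a => decide (2 ≤ List.count a array)) := by
  simp only [myImplement_alt]
  rw [b_loop, canonGo_eq, List.nil_append]
  apply List.filter_congr
  intro x _
  simp only [PySem.Dict.getD_foldl_insert_add_one, PySem.Set.empty, List.contains_nil,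
    Bool.not_false, Bool.and_true]
  have hempty : (PySem.Dict.empty : PySem.Dict Int Int).getD x 0 = 0 := rfl
  rw [hempty, decide_eq_decide]
  omega

lemma a_eq_filter (array : List Int) :
    myImplement array
      = (PySem.Set.ofList array).filter (fun a => decide (2 ≤ List.count a array)) := by
  simp only [myImplement]
  rw [PySem.List.pyRange_zero_natCast]
  have hd0 : ∀ a : Int, (PySem.Dict.empty : PySem.Dict Int Int).get? a
      = dspec (array.take 0) a := by
    intro a
    simp [dspec]
  have hml0 : List.map (fun _ => (0 : Int)) (List.map (fun k : Nat => (k : Int)) (List.range array.length))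
      = dupMask array 0 := by
    unfold dupMask
    rw [List.map_map]
    apply List.map_congr_left
    intro j _
    simp only [Function.comp]
    rw [if_neg (fun hh => by have := hh.2; simp [List.take_zero] at this)]
  have hA := a_loop array array.length 0 (dupMask array 0) PySem.Dict.empty
    (by omega) rfl hd0
  rw [← List.range_eq_range'] at hA
  rw [hml0, hA]
  have hmask : dupMask array array.length
      = (List.range array.length).map (fun j =>
          if List.idxOf (array.getD j 0) array = j ∧ 2 ≤ List.count (array.getD j 0) array then (1 : Int) else 0) := by
    simp [dupMask]
  rw [hmask]
  exact extract (fun v => 2 ≤ List.count v array) array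

-- ===== VERDICT (by name: the statement is the Claim_ definition above) =====
theorem myImplement_spec : Claim_equal_myImplement := by
  unfold Claim_equal_myImplement
  intro array _
  unfold Spec_myImplement
  rw [a_eq_filter, alt_eq_filter]
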